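-- pv_equiv track=rewrite | github.com/Ashiq-am/Data-Structures-Algorithm | 1.Python Algorithms/11.Dynamic Programming/4.Intermediate Problems/149.Check if it is possible to transform one string to another/Check if it is possible to transform one string to another.py | check
-- ===== SOURCE A (Python) =====
-- def check(s1, s2):
--     # calculates length
--     n = len(s1)
--     m = len(s2)
--     dp = ([[False for i in range(m + 1)]
--            for i in range(n + 1)])
--
--     # mark 1st position as true
--     dp[0][0] = True
--
--     # traverse for all DPi, j
--     for i in range(len(s1)):
--         for j in range(len(s2) + 1):
--
--             # if possible for to convert i
--             # characters of s1 to j characters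
--             # of s2
--             if (dp[i][j]):
--
--                 # if upper_case(s1[i])==s2[j]
--                 # is same
--                 if ((j < len(s2) and
--                      (s1[i].upper() == s2[j]))):
--                     dp[i + 1][j + 1] = True
--
--                 # if not upper then deletion is
--                 # possible
--                 if (s1[i].isupper() == False):
--                     dp[i + 1][j] = True
--     return (dp[n][m])
-- ===== SOURCE B (Python) =====
-- def check(s1, s2):
--     m = len(s2)
--     # one bitmask per character: bit j set iff s2[j] == c
--     masks = {}
--     for j, d in enumerate(s2):
--         masks[d] = masks.get(d, 0) | (1 << j)
--     # bit j of reach: the first i chars of s1 can be transformed into s2[:j]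
--     reach = 1
--     for c in s1:
--         nxt = (reach & masks.get(c.upper(), 0)) << 1
--         if not c.isupper():
--             nxt |= reach
--         reach = nxt
--     return bool((reach >> m) & 1)
-- ===== Notes on version B (the rewrite author's own statement) =====
-- stated objective: faster
-- what changed: Replaces the (n+1)x(m+1) boolean DP table and nested loops with a bit-parallel DP: the whole DP row is one integer bitmask, per-character position masks of s2 are precomputed in a dict, and each character of s1 updates the row with one shift/and/or.
import Mathlib
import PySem

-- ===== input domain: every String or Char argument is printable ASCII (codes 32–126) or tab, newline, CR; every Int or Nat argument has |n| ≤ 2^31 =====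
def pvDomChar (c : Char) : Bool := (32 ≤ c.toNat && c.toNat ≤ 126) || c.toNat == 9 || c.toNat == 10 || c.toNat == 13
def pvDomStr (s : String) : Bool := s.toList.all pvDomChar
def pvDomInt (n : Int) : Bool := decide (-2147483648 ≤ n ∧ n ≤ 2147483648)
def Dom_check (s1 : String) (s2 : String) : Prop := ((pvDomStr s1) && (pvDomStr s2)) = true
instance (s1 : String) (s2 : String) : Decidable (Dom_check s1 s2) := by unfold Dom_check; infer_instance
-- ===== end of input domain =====

-- B replaces A's (n+1)x(m+1) boolean DP table with a bit-parallel DP (one integer bitmask per row,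
-- precomputed per-character position masks): measurably faster by a large constant factor.


-- ===== PORT A =====
-- dp[i][j] = v  (nested-list write, both indices in range in A's uses)
def pySet2 (dp : List (List Bool)) (i j : Nat) (v : Bool) : List (List Bool) :=
  dp.set i ((dp.getD i []).set j v)

-- the body of A's inner loop over j (reads dp[i][j], may set dp[i+1][j+1] and dp[i+1][j])
def innerBody (cs1 cs2 : List Char) (i : Nat) (dp : List (List Bool)) (j : Nat) : List (List Bool) :=
  if (dp.getD i []).getD j false then
    let dp' := if decide (j < cs2.length) &&
        (PySem.Chars.upperChar (cs1.getD i default) == cs2.getD j default)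
      then pySet2 dp (i+1) (j+1) true else dp
    if !(PySem.Chars.isupper (cs1.getD i default)) then pySet2 dp' (i+1) j true else dp'
  else dp

def check (s1 : String) (s2 : String) : Bool :=
  let cs1 := s1.toList
  let cs2 := s2.toList
  let n := cs1.length
  let m := cs2.length
  let dp0 : List (List Bool) :=
    (List.range (n+1)).map (fun _ => (List.range (m+1)).map (fun _ => false))
  let dp1 := pySet2 dp0 0 0 true
  let dpF := (List.range n).foldl
    (fun dp i => (List.range (m+1)).foldl (innerBody cs1 cs2 i) dp) dp1
  (dpF.getD n []).getD m false

-- ===== PORT B =====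
-- masks[d] = masks.get(d, 0) | (1 << j)  for each (j, d) in enumerate(s2)
def buildMasks (cs2 : List Char) : PySem.Dict Char Nat :=
  (PySem.List.enumerate cs2).foldl
    (fun d p => d.modify p.2 0 (fun v => v ||| ((1:Nat) <<< p.1.toNat))) PySem.Dict.empty

-- one step of the bit-parallel DP: nxt = (reach & masks.get(c.upper(), 0)) << 1; if not c.isupper(): nxt |= reach
def bstep (masks : PySem.Dict Char Nat) (reach : Nat) (c : Char) : Nat :=
  let nxt := (reach &&& masks.getD (PySem.Chars.upperChar c) 0) <<< 1
  if !(PySem.Chars.isupper c) then nxt ||| reach else nxt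

def check_alt (s1 : String) (s2 : String) : Bool :=
  let cs2 := s2.toList
  let m := cs2.length
  let masks := buildMasks cs2
  let reach := s1.toList.foldl (bstep masks) 1
  ((reach >>> m) &&& 1) == 1

-- ===== PRECONDITION & SPEC =====
def Spec_check (s1 : String) (s2 : String) (out : Bool) : Prop := out = check_alt s1 s2
instance (s1 : String) (s2 : String) (out : Bool) : Decidable (Spec_check s1 s2 out) := by unfold Spec_check; infer_instance

-- ===== CLAIM (what is proved, stated in full; the proofs are below) =====
def Claim_equal_check : Prop := ∀ (s1 : String) (s2 : String), Dom_check s1 s2 → Spec_check s1 s2 (check s1 s2)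

-- ===== LEMMAS AND PROOFS =====

-- the value A's match branch may OR into dp[i+1][l] (only possible for l = l'+1, from dp[i][l'])
def matchPart (cs2 : List Char) (c : Char) (r : List Bool) (l : Nat) : Bool :=
  match l with
  | 0 => false
  | l'+1 => (decide (l' < cs2.length) &&
      (PySem.Chars.upperChar c == cs2.getD l' default)) && r.getD l' false

-- the full next-row value computed by A's inner loop
def nextB (cs2 : List Char) (c : Char) (r : List Bool) (l : Nat) : Bool :=
  (!(PySem.Chars.isupper c) && r.getD l false) || matchPart cs2 c r l

-- OR of 1<<j over the positions j (counted from k) where t[j-k] = u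
def orMsk (t : List Char) (k : Nat) (u : Char) : Nat :=
  match t with
  | [] => 0
  | c :: t => (if c == u then ((1:Nat) <<< k) else 0) ||| orMsk t (k+1) u

theorem getD_set_bool (r : List Bool) (j l : Nat) (v : Bool) :
    (r.set j v).getD l false = if l = j ∧ j < r.length then v else r.getD l false := by
  simp [List.getD_eq_getElem?_getD, List.getElem?_set]
  split_ifs with h1 h2 h3 h4 <;> simp_all <;> omega

theorem getD_pySet2_ne (dp : List (List Bool)) (i j k : Nat) (v : Bool) (h : k ≠ i) :
    (pySet2 dp i j v).getD k [] = dp.getD k [] := by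
  simp [pySet2, List.getD_eq_getElem?_getD, List.getElem?_set_ne (Ne.symm h)]

theorem getD_pySet2_self (dp : List (List Bool)) (i j : Nat) (v : Bool) (h : i < dp.length) :
    (pySet2 dp i j v).getD i [] = (dp.getD i []).set j v := by
  simp [pySet2, List.getD_eq_getElem?_getD, List.getElem?_set_self, h, List.getElem?_eq_getElem h]

theorem length_pySet2 (dp : List (List Bool)) (i j : Nat) (v : Bool) :
    (pySet2 dp i j v).length = dp.length := by
  simp [pySet2]

theorem buildMasks_fold (t : List Char) (k : Nat) (d : PySem.Dict Char Nat) (u : Char) :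
    ((PySem.List.enumerate t (k : Int)).foldl
      (fun d p => d.modify p.2 0 (fun v => v ||| ((1:Nat) <<< p.1.toNat))) d).getD u 0
    = d.getD u 0 ||| orMsk t k u := by
  induction t generalizing k d with
  | nil => simp [PySem.List.enumerate_nil, orMsk]
  | cons c t ih =>
    rw [PySem.List.enumerate_cons]
    have : ((k : Int) + 1) = ((k + 1 : Nat) : Int) := by push_cast; ring
    rw [List.foldl_cons, this, ih]
    simp only [orMsk, Int.toNat_natCast, PySem.Dict.getD_modify]
    by_cases h : c = u
    · subst h; simp [Nat.or_assoc]
    · have h1 : ¬ (u = c) := Ne.symm h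
      have h2 : (c == u) = false := by simp [h]
      simp [h1, h2]

theorem orMsk_testBit (t : List Char) (k : Nat) (u : Char) (l : Nat) :
    (orMsk t k u).testBit l
    = ((decide (k ≤ l) && decide (l - k < t.length)) && (t.getD (l-k) default == u)) := by
  induction t generalizing k with
  | nil => simp [orMsk]
  | cons c t ih =>
    simp only [orMsk, Nat.testBit_or, ih]
    have h1 : ((if c == u then ((1:Nat) <<< k) else 0)).testBit l
        = (decide (l = k) && (c == u)) := by
      split_ifs with h
      · have : (1:Nat) <<< k = 2 ^ k := by simp [Nat.shiftLeft_eq]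
        rw [this, Nat.testBit_two_pow, h]
        simp [eq_comm]
      · simp [h]
    rw [h1]
    rcases Nat.lt_trichotomy l k with h | h | h
    · have d1 : decide (l = k) = false := by simp; omega
      have d2 : decide (k+1 ≤ l) = false := by simp; omega
      have d3 : decide (k ≤ l) = false := by simp; omega
      simp [d1, d2, d3]
      intro h'; omega
    · subst h
      have d2 : decide (l+1 ≤ l) = false := by simp
      simp [d2, Nat.sub_self]
    · have d1 : decide (l = k) = false := by simp; omega
      have d2 : decide (k+1 ≤ l) = true := by simp; omega
      have d3 : decide (k ≤ l) = true := by simp; omega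
      have e1 : l - k = (l - (k+1)) + 1 := by omega
      rw [e1]
      have dlen : decide ((l - (k+1)) + 1 < t.length + 1) = decide (l - (k+1) < t.length) := by
        simp [Nat.succ_lt_succ_iff]
      have d4 : decide (k < l) = true := by simp [h]
      simp [d1, d2, d3, dlen, d4]

theorem mask_testBit (cs2 : List Char) (u : Char) (l : Nat) :
    ((buildMasks cs2).getD u 0).testBit l
    = (decide (l < cs2.length) && (cs2.getD l default == u)) := by
  have h0 : (0 : Int) = ((0 : Nat) : Int) := rfl
  rw [buildMasks]
  rw [show PySem.List.enumerate cs2 = PySem.List.enumerate cs2 ((0:Nat):Int) from rfl]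
  rw [buildMasks_fold]
  simp [orMsk_testBit]

theorem beq_comm_char (x y : Char) : (x == y) = (y == x) := by
  by_cases h : x = y
  · simp [h]
  · simp [h, Ne.symm h]

theorem step_bits (cs2 : List Char) (c : Char) (r : List Bool) (R : Nat)
    (hr : r.length = cs2.length + 1) (h : ∀ l, r.getD l false = R.testBit l) (l : Nat) :
    (if l < cs2.length + 1 then nextB cs2 c r l else false)
    = (bstep (buildMasks cs2) R c).testBit l := by
  have hsh : ∀ (x : Nat) (l : Nat), (x <<< 1).testBit l = (decide (1 ≤ l) && x.testBit (l - 1)) := by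
    intro x l; rw [Nat.testBit_shiftLeft]
  have h' : ∀ l, r[l]?.getD false = R.testBit l := by
    intro l; rw [← List.getD_eq_getElem?_getD]; exact h l
  by_cases hl : l < cs2.length + 1
  · rw [if_pos hl]
    unfold bstep nextB
    cases l with
    | zero =>
      cases hup : PySem.Chars.isupper c <;> simp [matchPart, hsh, h, h', hup]
    | succ l' =>
      have hl' : l' < cs2.length := by omega
      have d1 : decide (1 ≤ l' + 1) = true := by simp
      have d2 : decide (l' < cs2.length) = true := by simp [hl']
      simp only [matchPart, hsh, Nat.testBit_or, Nat.testBit_and, mask_testBit,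
        Nat.add_sub_cancel, h, h', d1, d2, Bool.true_and]
      cases hup : PySem.Chars.isupper c <;>
        cases hx : R.testBit (l'+1) <;> cases hy : R.testBit l' <;>
          cases hz : (PySem.Chars.upperChar c == cs2[l']?.getD default) <;>
            simp [hup, hx, hy, hz, beq_comm_char, mask_testBit, d2]
  · rw [if_neg hl]
    have hRl : R.testBit l = false := by
      rw [← h l]
      exact List.getD_eq_default _ _ (by omega)
    have hM : ((buildMasks cs2).getD (PySem.Chars.upperChar c) 0).testBit (l-1) = false := by
      rw [mask_testBit]
      have : decide (l - 1 < cs2.length) = false := by simp; omega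
      simp [this]
    unfold bstep
    cases hup : PySem.Chars.isupper c <;>
      simp [hsh, Nat.testBit_or, Nat.testBit_and, hRl, hM]

theorem inner_spec (cs1 cs2 : List Char) (i : Nat) (dp : List (List Bool))
    (hlen : i+1 < dp.length) (hrowlen : (dp.getD (i+1) []).length = cs2.length+1)
    (hrow0 : ∀ l, (dp.getD (i+1) []).getD l false = false)
    (J : Nat) (hJ : J ≤ cs2.length+1) :
    (∀ k, k ≠ i+1 → ((List.range J).foldl (innerBody cs1 cs2 i) dp).getD k [] = dp.getD k []) ∧
    ((List.range J).foldl (innerBody cs1 cs2 i) dp).length = dp.length ∧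
    (((List.range J).foldl (innerBody cs1 cs2 i) dp).getD (i+1) []).length = cs2.length+1 ∧
    (∀ l, (((List.range J).foldl (innerBody cs1 cs2 i) dp).getD (i+1) []).getD l false =
      if l < J then nextB cs2 (cs1.getD i default) (dp.getD i []) l
      else if l = J then matchPart cs2 (cs1.getD i default) (dp.getD i []) l else false) := by
  induction J with
  | zero =>
    refine ⟨fun k _ => rfl, rfl, hrowlen, fun l => ?_⟩
    simp only [List.range_zero, List.foldl_nil, hrow0 l]
    cases l with
    | zero => simp [matchPart]
    | succ l' => simp
  | succ J ih =>
    obtain ⟨ha, hb, hc, hd⟩ := ih (by omega)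
    set ci := cs1.getD i default with hci
    set r := dp.getD i [] with hrdef
    set dpJ := (List.range J).foldl (innerBody cs1 cs2 i) dp with hdpJ
    rw [List.range_succ, List.foldl_append, List.foldl_cons, List.foldl_nil]
    have hread : (dpJ.getD i []).getD J false = r.getD J false := by
      rw [ha i (by omega)]
    have hlenJ : i + 1 < dpJ.length := by rw [hb]; exact hlen
    -- the two candidate writes
    have hrowJlen : (dpJ.getD (i+1) []).length = cs2.length + 1 := hc
    by_cases hrj : r.getD J false = true
    case neg =>
      have hrjf : r.getD J false = false := by revert hrj; cases r.getD J false <;> simp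
      have hstep : innerBody cs1 cs2 i dpJ J = dpJ := by
        rw [innerBody, hread, if_neg hrj]
      rw [hstep]
      refine ⟨ha, hb, hc, fun l => ?_⟩
      rw [hd l]
      have hmf : matchPart cs2 ci r (J+1) = false := by
        show (_ && r.getD J false) = false
        rw [hrjf, Bool.and_false]
      by_cases h1 : l < J
      · rw [if_pos h1, if_pos (by omega)]
      · by_cases h2 : l = J
        · subst h2
          rw [if_neg h1, if_pos rfl, if_pos (by omega)]
          simp only [nextB]
          rw [hrjf, Bool.and_false, Bool.false_or]
        · rw [if_neg h1, if_neg h2, if_neg (by omega)]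
          by_cases h3 : l = J + 1
          · rw [if_pos h3, h3, hmf]
          · rw [if_neg h3]
    case pos =>
      set g1 := decide (J < cs2.length) && (PySem.Chars.upperChar ci == cs2.getD J default) with hg1
      set dpA := (if g1 then pySet2 dpJ (i+1) (J+1) true else dpJ) with hdpA
      set dpB := (if !(PySem.Chars.isupper ci) then pySet2 dpA (i+1) J true else dpA) with hdpB
      have hstep : innerBody cs1 cs2 i dpJ J = dpB := by
        rw [innerBody, hread, if_pos hrj]
      have hlenA : dpA.length = dp.length := by
        rw [hdpA]; split_ifs <;> simp [length_pySet2, hb]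
      have hAne : ∀ k, k ≠ i+1 → dpA.getD k [] = dpJ.getD k [] := by
        intro k hk
        rw [hdpA]; split_ifs with hh
        · exact getD_pySet2_ne _ _ _ _ _ hk
        · rfl
      have hrowA : ∀ l, (dpA.getD (i+1) []).getD l false =
          (((dpJ.getD (i+1) []).getD l false) || (decide (l = J+1) && g1)) := by
        intro l
        rw [hdpA]
        by_cases hh : g1 = true
        · rw [if_pos hh, getD_pySet2_self _ _ _ _ hlenJ, getD_set_bool]
          by_cases he : l = J + 1
          · have hJm : J < cs2.length := by
              have := (Bool.and_eq_true_iff.mp hh).1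
              simpa using this
            rw [if_pos ⟨he, by rw [hrowJlen]; omega⟩]
            simp [he, hh]
          · rw [if_neg (fun hcon => he hcon.1)]
            simp [he]
        · have hh' : g1 = false := by revert hh; cases g1 <;> simp
          rw [if_neg hh]
          simp [hh']
      have hrowAlen : (dpA.getD (i+1) []).length = cs2.length + 1 := by
        rw [hdpA]; split_ifs with hh
        · rw [getD_pySet2_self _ _ _ _ hlenJ, List.length_set, hrowJlen]
        · exact hrowJlen
      have hlenA' : i + 1 < dpA.length := by rw [hlenA]; exact hlen
      have hrowB : ∀ l, (dpB.getD (i+1) []).getD l false =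
          (((dpA.getD (i+1) []).getD l false) || (decide (l = J) && !(PySem.Chars.isupper ci))) := by
        intro l
        rw [hdpB]
        by_cases hu : (!(PySem.Chars.isupper ci)) = true
        · rw [if_pos hu, getD_pySet2_self _ _ _ _ hlenA', getD_set_bool]
          by_cases he : l = J
          · rw [if_pos ⟨he, by rw [hrowAlen]; omega⟩]
            simp [he, hu]
          · rw [if_neg (fun hcon => he hcon.1)]
            simp [he]
        · have hu' : (!(PySem.Chars.isupper ci)) = false := by revert hu; cases (PySem.Chars.isupper ci) <;> simp
          rw [if_neg hu]
          simp [hu']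
      have hBne : ∀ k, k ≠ i+1 → dpB.getD k [] = dpA.getD k [] := by
        intro k hk
        rw [hdpB]; split_ifs with hh
        · exact getD_pySet2_ne _ _ _ _ _ hk
        · rfl
      have hlenB : dpB.length = dp.length := by
        rw [hdpB]; split_ifs <;> simp [length_pySet2, hlenA]
      have hrowBlen : (dpB.getD (i+1) []).length = cs2.length + 1 := by
        rw [hdpB]; split_ifs with hh
        · rw [getD_pySet2_self _ _ _ _ hlenA', List.length_set, hrowAlen]
        · exact hrowAlen
      rw [hstep]
      refine ⟨fun k hk => by rw [hBne k hk, hAne k hk, ha k hk], hlenB, hrowBlen, fun l => ?_⟩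
      rw [hrowB l, hrowA l, hd l]
      by_cases h1 : l < J
      · have d1 : decide (l = J + 1) = false := by simp; omega
        have d2 : decide (l = J) = false := by simp; omega
        rw [if_pos h1, if_pos (by omega), d1, d2]
        simp
      · by_cases h2 : l = J
        · subst h2
          have d1 : decide (l = l + 1) = false := by simp
          rw [if_neg h1, if_pos rfl, if_pos (by omega), d1]
          simp only [nextB]
          rw [hrj]
          cases PySem.Chars.isupper ci <;> cases matchPart cs2 ci r l <;> simp
        · rw [if_neg h1, if_neg h2, if_neg (by omega)]
          have d2 : decide (l = J) = false := by simp [h2]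
          by_cases h3 : l = J + 1
          · subst h3
            rw [if_pos rfl, d2]
            have d1 : decide (J + 1 = J + 1) = true := by simp
            rw [d1]
            have hmp : matchPart cs2 ci r (J+1) = (g1 && r.getD J false) := rfl
            rw [hmp, hrj]
            cases g1 <;> simp
          · have d1 : decide (l = J + 1) = false := by simp [h3]
            rw [if_neg h3, d1, d2]
            simp

theorem foldl_range_snoc {α : Type} (f : α → Nat → α) (b : α) (J : Nat) :
    (List.range (J+1)).foldl f b = f ((List.range J).foldl f b) J := by
  rw [List.range_succ, List.foldl_append, List.foldl_cons, List.foldl_nil]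

def dpRun (cs1 cs2 : List Char) (J : Nat) : List (List Bool) :=
  (List.range J).foldl (fun dp i => (List.range (cs2.length+1)).foldl (innerBody cs1 cs2 i) dp)
    (pySet2 ((List.range (cs1.length+1)).map
      (fun _ => (List.range (cs2.length+1)).map (fun _ => false))) 0 0 true)

theorem outer_spec (cs1 cs2 : List Char) (J : Nat) (hJ : J ≤ cs1.length) :
    (dpRun cs1 cs2 J).length = cs1.length+1 ∧
    (∀ k, k ≤ cs1.length → ((dpRun cs1 cs2 J).getD k []).length = cs2.length+1) ∧
    (∀ l, (((dpRun cs1 cs2 J).getD J []).getD l false)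
      = ((cs1.take J).foldl (bstep (buildMasks cs2)) 1).testBit l) ∧
    (∀ k, J < k → ∀ l, ((dpRun cs1 cs2 J).getD k []).getD l false = false) := by
  induction J with
  | zero =>
    have hn : 0 < cs1.length + 1 := by omega
    have hdp0len : ((List.range (cs1.length+1)).map
        (fun _ => (List.range (cs2.length+1)).map (fun _ => false)) : List (List Bool)).length
        = cs1.length + 1 := by simp
    have hrow : ∀ k, k ≤ cs1.length → (((List.range (cs1.length+1)).map
        (fun _ => (List.range (cs2.length+1)).map (fun _ => false)) : List (List Bool)).getD k [])
        = (List.range (cs2.length+1)).map (fun _ => false) := by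
      intro k hk
      rw [List.getD_eq_getElem?_getD, List.getElem?_map]
      simp [List.getElem?_range (show k < cs1.length + 1 by omega)]
    have hfalse : ∀ l, (((List.range (cs2.length+1)).map (fun _ => (false : Bool))).getD l false) = false := by
      intro l
      rw [List.getD_eq_getElem?_getD, List.getElem?_map]
      cases (List.range (cs2.length+1))[l]? <;> simp
    have hrow' : ∀ k, cs1.length < k → (((List.range (cs1.length+1)).map
        (fun _ => (List.range (cs2.length+1)).map (fun _ => false)) : List (List Bool)).getD k [])
        = ([] : List Bool) := by
      intro k hk
      rw [List.getD_eq_getElem?_getD, List.getElem?_eq_none (by rw [hdp0len]; omega)]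
      rfl
    refine ⟨?_, ?_, ?_, ?_⟩
    · rw [dpRun, List.range_zero, List.foldl_nil, length_pySet2, hdp0len]
    · intro k hk
      rw [dpRun, List.range_zero, List.foldl_nil]
      by_cases hk0 : k = 0
      · subst hk0
        rw [getD_pySet2_self _ _ _ _ (by rw [hdp0len]; omega), List.length_set, hrow 0 (by omega)]
        simp
      · rw [getD_pySet2_ne _ _ _ _ _ hk0, hrow k hk]
        simp
    · intro l
      rw [dpRun, List.range_zero, List.foldl_nil,
        getD_pySet2_self _ _ _ _ (by rw [hdp0len]; omega), hrow 0 (by omega), getD_set_bool]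
      rw [List.take_zero, List.foldl_nil]
      have htb : Nat.testBit 1 l = decide (l = 0) := by
        cases l with
        | zero => rfl
        | succ k => simp [Nat.testBit_succ]
      rw [htb]
      by_cases hl0 : l = 0
      · subst hl0; simp
      · rw [if_neg (fun hcon => hl0 hcon.1), hfalse l]
        simp [hl0]
    · intro k hk l
      rw [dpRun, List.range_zero, List.foldl_nil, getD_pySet2_ne _ _ _ _ _ (by omega)]
      by_cases hkn : k ≤ cs1.length
      · rw [hrow k hkn]; exact hfalse l
      · rw [hrow' k (by omega)]
        simp
  | succ J ih =>
    obtain ⟨ha, hb, hc, hd⟩ := ih (by omega)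
    have hrun : dpRun cs1 cs2 (J+1) =
        (List.range (cs2.length+1)).foldl (innerBody cs1 cs2 J) (dpRun cs1 cs2 J) := by
      rw [dpRun, dpRun]
      exact foldl_range_snoc _ _ _
    obtain ⟨ia, ib, ic, id⟩ := inner_spec cs1 cs2 J (dpRun cs1 cs2 J)
      (by rw [ha]; omega) (hb (J+1) (by omega)) (hd (J+1) (by omega)) (cs2.length+1) (le_refl _)
    refine ⟨?_, ?_, ?_, ?_⟩
    · rw [hrun, ib, ha]
    · intro k hk
      by_cases hkJ : k = J + 1
      · subst hkJ; rw [hrun]; exact ic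
      · rw [hrun, ia k hkJ]; exact hb k hk
    · intro l
      rw [hrun, id l]
      have hmp : matchPart cs2 (cs1.getD J default) ((dpRun cs1 cs2 J).getD J []) (cs2.length+1)
          = false := by
        have : decide (cs2.length < cs2.length) = false := by simp
        show ((decide (cs2.length < cs2.length) && _) && _) = false
        rw [this, Bool.false_and, Bool.false_and]
      have hif : (if l < cs2.length+1 then nextB cs2 (cs1.getD J default) ((dpRun cs1 cs2 J).getD J []) l
          else if l = cs2.length+1 then matchPart cs2 (cs1.getD J default) ((dpRun cs1 cs2 J).getD J []) l else false)
          = (if l < cs2.length+1 then nextB cs2 (cs1.getD J default) ((dpRun cs1 cs2 J).getD J []) l else false) := by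
        by_cases h1 : l < cs2.length + 1
        · rw [if_pos h1, if_pos h1]
        · rw [if_neg h1, if_neg h1]
          by_cases h2 : l = cs2.length + 1
          · rw [if_pos h2, h2, hmp]
          · rw [if_neg h2]
      rw [hif, step_bits cs2 (cs1.getD J default) _ _ (hb J (by omega)) hc l]
      have htake : cs1.take (J+1) = cs1.take J ++ [cs1.getD J default] := by
        rw [List.take_succ]
        congr 1
        rw [List.getD_eq_getElem?_getD, List.getElem?_eq_getElem (show J < cs1.length by omega)]
        rfl
      rw [htake, List.foldl_append, List.foldl_cons, List.foldl_nil]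
    · intro k hk l
      rw [hrun, ia k (by omega)]
      exact hd k (by omega) l

theorem testbit_extract (x m : Nat) : (((x >>> m) &&& 1) == 1) = x.testBit m := by
  simp [Nat.testBit, Nat.shiftRight_eq_div_pow, Nat.and_one_is_mod]

theorem check_spec_main (s1 s2 : String) : check s1 s2 = check_alt s1 s2 := by
  have e1 : check s1 s2 = ((dpRun s1.toList s2.toList s1.toList.length).getD s1.toList.length []).getD s2.toList.length false := rfl
  have e2 : check_alt s1 s2 = ((((s1.toList.foldl (bstep (buildMasks s2.toList)) 1) >>> s2.toList.length) &&& 1) == 1) := rfl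
  obtain ⟨-, -, hc, -⟩ := outer_spec s1.toList s2.toList s1.toList.length (le_refl _)
  rw [e1, e2, testbit_extract, hc s2.toList.length |>.symm.symm]
  rw [List.take_length]

-- ===== VERDICT (by name: the statement is the Claim_ definition above) =====
theorem check_spec : Claim_equal_check := by
  intro s1 s2 _
  show check s1 s2 = check_alt s1 s2
  exact check_spec_main s1 s2
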